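-- pv_equiv track=rewrite | github.com/yfZhong/HIFE | lib/model.py | get_layer_node_number
-- ===== SOURCE A (Python) =====
-- import math
--
-- def get_layer_node_number(num_models=8):
--     layers={}
--     n = num_models
--     l = 0
--     while n>1:
--         n = math.ceil(n/2)
--         # n = math.floor(n / 2)
--         layers[l] = n
--         l += 1
--     return layers
-- ===== SOURCE B (Python) =====
-- import math
--
-- def get_layer_node_number(num_models=8):
--     # Count layers, then compute each entry directly from num_models:
--     # ceil(ceil(n/2)/2) = ceil(n/4), so layer l holds ceil(num_models / 2**(l+1)).
--     L = 0
--     while math.ceil(num_models / 2 ** L) > 1: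
--         L += 1
--     return {l: math.ceil(num_models / 2 ** (l + 1)) for l in range(L)}
-- ===== Notes on version B (the rewrite author's own statement) =====
-- stated objective: simpler
-- what changed: B drops the carried halving accumulator: it first counts the layers L by testing ceil(num_models/2**l) > 1, then builds the dict in one comprehension with each value computed directly from num_models as ceil(num_models/2**(l+1)), using ceil(ceil(n/2)/2) = ceil(n/4).
import Mathlib
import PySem

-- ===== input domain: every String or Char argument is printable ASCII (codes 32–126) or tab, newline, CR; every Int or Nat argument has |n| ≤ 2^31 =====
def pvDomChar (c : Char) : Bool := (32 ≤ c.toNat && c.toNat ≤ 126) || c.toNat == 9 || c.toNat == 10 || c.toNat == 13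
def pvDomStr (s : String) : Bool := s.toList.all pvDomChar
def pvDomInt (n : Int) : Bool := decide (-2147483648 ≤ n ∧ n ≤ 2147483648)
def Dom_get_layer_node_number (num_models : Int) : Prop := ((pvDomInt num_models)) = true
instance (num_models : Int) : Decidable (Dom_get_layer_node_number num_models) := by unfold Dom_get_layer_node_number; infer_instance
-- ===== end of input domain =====

-- B replaces A's carried halving accumulator by counting the layers first and then
-- computing each entry directly as ceil(num_models / 2^(l+1)); same cost, simpler decomposition.

-- ===== PORT A =====
-- math.ceil(n/2) on an int n (exact float division within |n| ≤ 2^31) equals -((-n) / 2)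
-- with floor division; Lean's Int `/` is ediv, which is floor division for the positive divisor 2.
def pvALoop (n : Int) (l : Int) : List (Int × Int) :=
  if h : n > 1 then
    let m := -((-n) / 2)
    (l, m) :: pvALoop m (l + 1)
  else []
termination_by n.toNat
decreasing_by
  omega

def get_layer_node_number (num_models : Int) : List (Int × Int) :=
  pvALoop num_models 0

-- ===== PORT B =====
-- math.ceil(num_models / 2**L) (exact float division within the domain) equals
-- -((-num_models) / 2^L) with floor division (Int `/` = ediv, floor for positive divisors).
def pvBCeil (num : Int) (l : Nat) : Int := -((-num) / 2 ^ l)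

-- key fact: halving the previous ceiling is the next ceiling (used here only for termination)
theorem pvBCeil_succ (num : Int) (l : Nat) : pvBCeil num (l + 1) = -((- pvBCeil num l) / 2) := by
  unfold pvBCeil
  rw [pow_succ, ← Int.ediv_ediv_of_nonneg (x := -num) (z := 2) (by positivity)]
  simp

-- the while loop counting L
def pvBCount (num : Int) (L : Nat) : Nat :=
  if pvBCeil num L > 1 then pvBCount num (L + 1) else L
termination_by (pvBCeil num L).toNat
decreasing_by
  rename_i h
  have := pvBCeil_succ num L
  omega

def get_layer_node_number_alt (num_models : Int) : List (Int × Int) :=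
  (List.range (pvBCount num_models 0)).map
    (fun (l : Nat) => ((l : Int), pvBCeil num_models (l + 1)))

-- ===== PRECONDITION & SPEC =====
def Spec_get_layer_node_number (num_models : Int) (out : List (Int × Int)) : Prop := out = get_layer_node_number_alt num_models
instance (num_models : Int) (out : List (Int × Int)) : Decidable (Spec_get_layer_node_number num_models out) := by unfold Spec_get_layer_node_number; infer_instance

-- ===== CLAIM (what is proved, stated in full; the proofs are below) =====
def Claim_equal_get_layer_node_number : Prop := ∀ (num_models : Int), Dom_get_layer_node_number num_models → Spec_get_layer_node_number num_models (get_layer_node_number num_models)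

-- ===== LEMMAS AND PROOFS =====

theorem pvBCount_ge (num : Int) (L : Nat) : L ≤ pvBCount num L := by
  fun_induction pvBCount with
  | case1 L h ih => omega
  | case2 L h => omega

theorem pvBCount_stop (num : Int) (L : Nat) (h : ¬ pvBCeil num L > 1) :
    pvBCount num L = L := by
  rw [pvBCount, if_neg h]

theorem pvBCount_step (num : Int) (L : Nat) (h : pvBCeil num L > 1) :
    pvBCount num L = pvBCount num (L + 1) := by
  rw [pvBCount, if_pos h]

-- the main correspondence: A's loop started at the l-th ceiling produces exactly B's
-- tail of entries from index l on
theorem pvMain (num : Int) (l : Nat) :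
    pvALoop (pvBCeil num l) (l : Int) =
      (List.range' l (pvBCount num l - l)).map
        (fun (i : Nat) => ((i : Int), pvBCeil num (i + 1))) := by
  by_cases h : pvBCeil num l > 1
  · have hc := pvBCount_step num l h
    have hge := pvBCount_ge num (l + 1)
    have hsucc := pvBCeil_succ num l
    rw [pvALoop, dif_pos h]
    show (((l : Int), -(-pvBCeil num l / 2)) ::
        pvALoop (-(-pvBCeil num l / 2)) ((l : Int) + 1)) = _
    have hrange : pvBCount num l - l = (pvBCount num (l + 1) - (l + 1)) + 1 := by omega
    rw [← hsucc, hrange, List.range'_succ, List.map_cons]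
    have ih := pvMain num (l + 1)
    push_cast at ih
    rw [ih]
  · rw [pvALoop, dif_neg h, pvBCount_stop num l h]
    simp
termination_by (pvBCeil num l).toNat
decreasing_by
  have := pvBCeil_succ num l
  unfold pvBCeil at *
  omega

-- ===== VERDICT (by name: the statement is the Claim_ definition above) =====
theorem get_layer_node_number_spec : Claim_equal_get_layer_node_number := by
  intro num _
  unfold Spec_get_layer_node_number get_layer_node_number get_layer_node_number_alt
  have h := pvMain num 0
  have h0 : pvBCeil num 0 = num := by unfold pvBCeil; simp
  rw [h0] at h
  simpa [List.range_eq_range'] using h
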